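-- pv_equiv track=rewrite | github.com/donnelt6/2026-csc1097-donnelt6-szumlig2 | src/apps/worker/worker/youtube.py | _pick_caption_any
-- ===== SOURCE A (Python) =====
-- from typing import Optional
--
-- def _pick_caption_any(captions: dict) -> Optional[tuple[str, str, str]]:
--     if not captions:
--         return None
--     for lang, formats in captions.items():
--         selected = _select_caption_format(lang, formats)
--         if selected:
--             return selected
--     return None
--
-- def _select_caption_format(lang: str, formats: list[dict]) -> Optional[tuple[str, str, str]]:
--     if not formats or not isinstance(formats, list):
--         return None
--     preferred_exts = ["vtt", "srt", "json3", "srv1", "srv2", "srv3", "ttml"]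
--     for ext in preferred_exts:
--         for item in formats:
--             if item.get("ext") == ext and item.get("url"):
--                 return lang, item["url"], ext
--     for item in formats:
--         if item.get("url"):
--             return lang, item["url"], item.get("ext") or "vtt"
--     return None
-- ===== SOURCE B (Python) =====
-- from typing import Optional
--
-- def _pick_caption_any(captions: dict) -> Optional[tuple[str, str, str]]:
--     if not captions:
--         return None
--     for lang, formats in captions.items():
--         selected = _select_caption_format(lang, formats)
--         if selected:
--             return selected
--     return None
--
-- def _select_caption_format(lang: str, formats: list) -> Optional[tuple[str, str, str]]:
--     if not formats or not isinstance(formats, list):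
--         return None
--     by_ext = {}       # ext -> first url seen with that ext (truthy urls only)
--     fallback = None   # first (url, ext) with a truthy url
--     for item in formats:
--         url = item.get("url")
--         if not url:
--             continue
--         ext = item.get("ext")
--         by_ext.setdefault(ext, url)
--         if fallback is None:
--             fallback = (url, ext)
--     for ext in ("vtt", "srt", "json3", "srv1", "srv2", "srv3", "ttml"):
--         if ext in by_ext:
--             return lang, by_ext[ext], ext
--     if fallback is not None:
--         url, ext = fallback
--         return lang, url, ext or "vtt"
--     return None
-- ===== Notes on version B (the rewrite author's own statement) =====
-- stated objective: alternative
-- what changed: Replaces A's 7 preference-ordered rescans of the formats list by a single pass that builds an ext->first-url index (dict.setdefault) while capturing the first truthy-url fallback, then looks the preferred exts up in the index.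
import Mathlib
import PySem

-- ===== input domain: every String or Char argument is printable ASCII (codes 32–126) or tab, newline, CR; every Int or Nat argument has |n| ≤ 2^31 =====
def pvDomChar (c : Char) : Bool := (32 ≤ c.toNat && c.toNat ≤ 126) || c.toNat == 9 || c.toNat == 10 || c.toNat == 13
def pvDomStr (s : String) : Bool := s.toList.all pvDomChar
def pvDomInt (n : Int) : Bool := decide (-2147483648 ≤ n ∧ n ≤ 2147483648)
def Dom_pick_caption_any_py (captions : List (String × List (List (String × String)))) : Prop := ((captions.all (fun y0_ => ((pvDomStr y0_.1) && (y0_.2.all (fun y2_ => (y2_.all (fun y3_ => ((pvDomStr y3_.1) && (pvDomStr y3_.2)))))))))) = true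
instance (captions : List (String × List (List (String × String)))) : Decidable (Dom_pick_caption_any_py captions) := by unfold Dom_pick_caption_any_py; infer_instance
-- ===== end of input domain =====

-- B replaces A's nested preference×formats scans by one pass that indexes first url per ext
-- (dict.setdefault) and captures the first truthy-url fallback; objective: simpler/alternative.


-- shared helper: item.get(k) on an association-list dict (first match, None if absent)
def pyGetS (item : List (String × String)) (k : String) : Option String :=
  (item.find? (fun p => p.1 == k)).map Prod.snd

-- ===== PORT A =====
-- _select_caption_format: loop over preferred exts, inner loop over formats; then fallback loop
def selA (lang : String) (formats : List (List (String × String))) :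
    Option (String × String × String) :=
  if formats = [] then none
  else
    match (["vtt", "srt", "json3", "srv1", "srv2", "srv3", "ttml"] : List String).findSome?
        (fun ext => formats.findSome? (fun item =>
          match pyGetS item "url" with
          | some u => if pyGetS item "ext" = some ext ∧ u ≠ "" then some (lang, u, ext) else none
          | none => none)) with
    | some r => some r
    | none =>
      formats.findSome? (fun item =>
        match pyGetS item "url" with
        | some u =>
          if u ≠ "" then
            some (lang, u,
              match pyGetS item "ext" with
              | some e => if e = "" then "vtt" else e
              | none => "vtt")
          else none
        | none => none)

def pick_caption_any_py (captions : List (String × List (List (String × String)))) :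
    Option (String × String × String) :=
  if captions = [] then none
  else captions.findSome? (fun p => selA p.1 p.2)

-- ===== PORT B =====
-- one pass over formats: by_ext.setdefault(ext, url) + first (url, ext) fallback
def bStep (st : PySem.Dict (Option String) String × Option (String × Option String))
    (item : List (String × String)) :
    PySem.Dict (Option String) String × Option (String × Option String) :=
  match pyGetS item "url" with
  | some u =>
    if u = "" then st
    else
      (st.1.setdefault (pyGetS item "ext") u,
       match st.2 with
       | some f => some f
       | none => some (u, pyGetS item "ext"))
  | none => st

def selB (lang : String) (formats : List (List (String × String))) :
    Option (String × String × String) :=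
  if formats = [] then none
  else
    let st := formats.foldl bStep (PySem.Dict.empty, none)
    match (["vtt", "srt", "json3", "srv1", "srv2", "srv3", "ttml"] : List String).findSome?
        (fun ext => (st.1.get? (some ext)).map (fun u => (lang, u, ext))) with
    | some r => some r
    | none =>
      match st.2 with
      | some (u, e) =>
        some (lang, u, match e with | some e' => if e' = "" then "vtt" else e' | none => "vtt")
      | none => none

def pick_caption_any_py_alt (captions : List (String × List (List (String × String)))) :
    Option (String × String × String) :=
  if captions = [] then none
  else captions.findSome? (fun p => selB p.1 p.2)

-- ===== PRECONDITION & SPEC =====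
def Spec_pick_caption_any_py (captions : List (String × List (List (String × String)))) (out : Option (String × String × String)) : Prop := out = pick_caption_any_py_alt captions
instance (captions : List (String × List (List (String × String)))) (out : Option (String × String × String)) : Decidable (Spec_pick_caption_any_py captions out) := by unfold Spec_pick_caption_any_py; infer_instance

-- ===== CLAIM (what is proved, stated in full; the proofs are below) =====
def Claim_equal_pick_caption_any_py : Prop := ∀ (captions : List (String × List (List (String × String)))), Dom_pick_caption_any_py captions → Spec_pick_caption_any_py captions (pick_caption_any_py captions)

-- ===== LEMMAS AND PROOFS =====

-- first url among formats whose ext is k and whose url is truthy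
def urlFun (k : Option String) (item : List (String × String)) : Option String :=
  match pyGetS item "url" with
  | some u => if pyGetS item "ext" = k ∧ u ≠ "" then some u else none
  | none => none

-- first (url, ext) with a truthy url
def fbFun (item : List (String × String)) : Option (String × Option String) :=
  match pyGetS item "url" with
  | some u => if u ≠ "" then some (u, pyGetS item "ext") else none
  | none => none

theorem fold_fst (fs : List (List (String × String)))
    (d : PySem.Dict (Option String) String) (fb : Option (String × Option String))
    (k : Option String) :
    ((fs.foldl bStep (d, fb)).1).get? k =
      match d.get? k with
      | some u => some u
      | none => fs.findSome? (urlFun k) := by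
  induction fs generalizing d fb with
  | nil => simp; cases d.get? k <;> rfl
  | cons item fs ih =>
    simp only [List.foldl_cons, List.findSome?_cons, bStep, urlFun]
    cases hu : pyGetS item "url" with
    | none => simpa using ih d fb
    | some u =>
      by_cases hue : u = ""
      · subst hue
        simp only [ne_eq, reduceIte]
        rw [ih d fb]
        cases d.get? k with
        | some w => rfl
        | none => simp
      · simp only [if_neg hue]
        rw [ih]
        by_cases hk : pyGetS item "ext" = k
        · subst hk
          rw [PySem.Dict.get?_setdefault_self]
          cases hd : d.get? (pyGetS item "ext") with
          | some w => simp
          | none => simp [hue]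
        · have hne : k ≠ pyGetS item "ext" := fun h => hk h.symm
          have hset : (d.setdefault (pyGetS item "ext") u).get? k = d.get? k := by
            by_cases hc : d.contains (pyGetS item "ext")
            · rw [PySem.Dict.setdefault_of_contains _ _ hc]
            · rw [PySem.Dict.setdefault_of_not_contains _ _ (by simpa using hc),
                PySem.Dict.get?_insert_of_ne _ _ hne]
          rw [hset]
          cases d.get? k with
          | some w => rfl
          | none => simp [hk]

theorem fold_snd (fs : List (List (String × String)))
    (d : PySem.Dict (Option String) String) (fb : Option (String × Option String)) :
    (fs.foldl bStep (d, fb)).2 =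
      match fb with
      | some f => some f
      | none => fs.findSome? fbFun := by
  induction fs generalizing d fb with
  | nil => simp; cases fb <;> rfl
  | cons item fs ih =>
    simp only [List.foldl_cons, List.findSome?_cons, bStep, fbFun]
    cases hu : pyGetS item "url" with
    | none => simpa using ih d fb
    | some u =>
      by_cases hue : u = ""
      · subst hue
        simp only [ne_eq, reduceIte]
        rw [ih d fb]
        cases fb <;> simp
      · simp only [if_neg hue]
        rw [ih]
        cases fb with
        | some f => rfl
        | none => simp [hue]

theorem innerA_eq (fs : List (List (String × String))) (lang ext : String) :
    fs.findSome? (fun item =>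
        match pyGetS item "url" with
        | some u => if pyGetS item "ext" = some ext ∧ u ≠ "" then some (lang, u, ext) else none
        | none => none) =
      (fs.findSome? (urlFun (some ext))).map (fun u => (lang, u, ext)) := by
  induction fs with
  | nil => rfl
  | cons item fs ih =>
    simp only [List.findSome?_cons, urlFun]
    cases pyGetS item "url" with
    | none => exact ih
    | some u =>
      by_cases h : pyGetS item "ext" = some ext ∧ u ≠ ""
      · simp [h]
      · simp [h, ih]

theorem fallbackA_eq (fs : List (List (String × String))) (lang : String) :
    fs.findSome? (fun item =>
        match pyGetS item "url" with
        | some u =>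
          if u ≠ "" then
            some (lang, u,
              match pyGetS item "ext" with
              | some e => if e = "" then "vtt" else e
              | none => "vtt")
          else none
        | none => none) =
      (fs.findSome? fbFun).map (fun p =>
        (lang, p.1, match p.2 with | some e' => if e' = "" then "vtt" else e' | none => "vtt")) := by
  induction fs with
  | nil => rfl
  | cons item fs ih =>
    simp only [List.findSome?_cons, fbFun]
    cases pyGetS item "url" with
    | none => exact ih
    | some u =>
      by_cases h : u = ""
      · subst h
        simp only [ne_eq]
        exact ih
      · simp [h]

theorem sel_eq (lang : String) (fs : List (List (String × String))) :
    selA lang fs = selB lang fs := by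
  unfold selA selB
  by_cases hfs : fs = []
  · simp [hfs]
  · simp only [if_neg hfs]
    have h1 : ∀ ext : String,
        ((fs.foldl bStep (PySem.Dict.empty, none)).1).get? (some ext) =
          fs.findSome? (urlFun (some ext)) := by
      intro ext; rw [fold_fst]; simp
    have h2 : (fs.foldl bStep (PySem.Dict.empty, none)).2 = fs.findSome? fbFun := by
      rw [fold_snd]
    have hpref :
        (["vtt", "srt", "json3", "srv1", "srv2", "srv3", "ttml"] : List String).findSome?
            (fun ext => fs.findSome? (fun item =>
              match pyGetS item "url" with
              | some u => if pyGetS item "ext" = some ext ∧ u ≠ "" then some (lang, u, ext) else none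
              | none => none)) =
          (["vtt", "srt", "json3", "srv1", "srv2", "srv3", "ttml"] : List String).findSome?
            (fun ext => (((fs.foldl bStep (PySem.Dict.empty, none)).1).get? (some ext)).map
              (fun u => (lang, u, ext))) := by
      refine congrArg (fun f => List.findSome? f _) (funext fun ext => ?_)
      rw [h1, innerA_eq]
    rw [hpref]
    cases hm : (["vtt", "srt", "json3", "srv1", "srv2", "srv3", "ttml"] : List String).findSome?
        (fun ext => (((fs.foldl bStep (PySem.Dict.empty, none)).1).get? (some ext)).map
          (fun u => (lang, u, ext))) with
    | some r => rfl
    | none =>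
      simp only [fallbackA_eq fs lang, h2]
      cases fs.findSome? fbFun with
      | none => rfl
      | some p => rfl

-- ===== VERDICT (by name: the statement is the Claim_ definition above) =====
theorem pick_caption_any_py_spec : Claim_equal_pick_caption_any_py := by
  intro captions _
  unfold Spec_pick_caption_any_py pick_caption_any_py pick_caption_any_py_alt
  by_cases h : captions = []
  · simp [h]
  · simp only [if_neg h]
    exact congrArg (fun f => List.findSome? f captions)
      (funext fun p => sel_eq p.1 p.2)
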